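-- pv_equiv track=rewrite | github.com/Claybarn/CodeForWoodsHole2023 | CodeForWoodsHole2023/General/TimestampLib/timestamp_lib.py | timestamps_contained
-- ===== SOURCE A (Python) =====
-- def timestamp_contained(timestamp1_on,timestamp1_off,timestamp2_on,timestamp2_off):
--     #_check_valid_timestamps(timestamp1_on,timestamp1_off,timestamp2_on,timestamp2_off)
--     timestamp_contained_on = None
--     timestamp_contained_off = None
--     if timestamp1_on>=timestamp2_on and timestamp1_off<=timestamp2_off:
--         timestamp_contained_on = timestamp1_on
--         timestamp_contained_off = timestamp1_off
--     return timestamp_contained_on, timestamp_contained_off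
--
-- def timestamps_contained(timestamps1_on,timestamps1_off,timestamps2_on,timestamps2_off):
--     _check_valid_timestamps(timestamps1_on,timestamps1_off,timestamps2_on,timestamps2_off)
--     timestamps_contained_on = []
--     timestamps_contained_off = []
--     for i in range(len(timestamps1_off)):
--         for ii in range(len(timestamps2_off)):
--             and_on,and_off = timestamp_contained(timestamps1_on[i],timestamps1_off[i],timestamps2_on[ii],timestamps2_off[ii])
--             if and_on is not None:
--                 timestamps_contained_on.append(and_on)
--                 timestamps_contained_off.append(and_off)
--     return timestamps_contained_on, timestamps_contained_off
--
-- def _check_valid_timestamps(*argv):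
--     if len(argv[0]) != len(argv[1]):
--         if len(argv)>2:
--             raise ValueError('First pair of on and off timestamps have different lengths: ' + str(len(argv[0])) + ' and ' + str(len(argv[1])))
--         else:
--             raise ValueError('On and off timestamps have different lengths: ' + str(len(argv[0])) + ' and ' + str(len(argv[1])))
--     if len(argv)>2:
--         if len(argv[2]) != len(argv[3]):
--             raise ValueError('Second pair of on and off timestamps have different lengths: ' + str(len(argv[2])) + ' and ' + str(len(argv[3])))
-- ===== SOURCE B (Python) =====
-- def timestamps_contained(timestamps1_on, timestamps1_off, timestamps2_on, timestamps2_off):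
--     if len(timestamps1_on) != len(timestamps1_off):
--         raise ValueError('First pair of on and off timestamps have different lengths: '
--                          + str(len(timestamps1_on)) + ' and ' + str(len(timestamps1_off)))
--     if len(timestamps2_on) != len(timestamps2_off):
--         raise ValueError('Second pair of on and off timestamps have different lengths: '
--                          + str(len(timestamps2_on)) + ' and ' + str(len(timestamps2_off)))
--     # Transposed sweep: one pass per set-2 interval updating a per-query counter list,
--     # then materialize each contained interval by replication.
--     counts = [0] * len(timestamps1_on)
--     for o, f in zip(timestamps2_on, timestamps2_off):
--         counts = [c + 1 if a >= o and b <= f else c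
--                   for c, a, b in zip(counts, timestamps1_on, timestamps1_off)]
--     res_on = []
--     res_off = []
--     for (a, b), c in zip(zip(timestamps1_on, timestamps1_off), counts):
--         res_on += [a] * c
--         res_off += [b] * c
--     return res_on, res_off
-- ===== Notes on version B (the rewrite author's own statement) =====
-- stated objective: alternative
-- what changed: A appends output pairs inside a doubly nested i/ii index loop; B transposes the traversal (outer loop over set 2), maintains a per-query containment-count list built by comprehensions, and builds both output lists at the end by replicating each contained interval count-many times.
import Mathlib
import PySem

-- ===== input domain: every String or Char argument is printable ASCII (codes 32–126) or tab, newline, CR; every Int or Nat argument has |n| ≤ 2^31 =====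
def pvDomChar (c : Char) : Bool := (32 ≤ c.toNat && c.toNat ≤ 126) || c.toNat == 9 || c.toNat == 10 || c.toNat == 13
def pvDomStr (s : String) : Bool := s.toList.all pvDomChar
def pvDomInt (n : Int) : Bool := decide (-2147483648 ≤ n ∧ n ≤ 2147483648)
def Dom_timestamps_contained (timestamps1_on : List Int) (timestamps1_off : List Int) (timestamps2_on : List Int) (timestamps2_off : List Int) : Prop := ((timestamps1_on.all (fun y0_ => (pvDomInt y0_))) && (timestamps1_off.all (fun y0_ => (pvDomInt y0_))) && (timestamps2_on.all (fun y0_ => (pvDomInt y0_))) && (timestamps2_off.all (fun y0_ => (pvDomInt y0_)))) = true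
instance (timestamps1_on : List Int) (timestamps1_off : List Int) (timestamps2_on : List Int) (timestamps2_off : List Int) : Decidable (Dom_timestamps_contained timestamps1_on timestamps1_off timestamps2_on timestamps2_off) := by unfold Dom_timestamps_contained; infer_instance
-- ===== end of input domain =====

-- B replaces A's nested index loops (append per hit) by a transposed sweep over set 2 that
-- maintains a per-query containment-count list and then builds both outputs by replication
-- (objective: alternative structure, same asymptotic cost).

-- ===== PORT A =====
-- helper timestamp_contained (single pair): returns (None, None) or the contained pair
def timestamp_contained_one (a b o f : Int) : Option Int × Option Int :=
  if a ≥ o ∧ b ≤ f then (some a, some b) else (none, none)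

def timestamps_contained (timestamps1_on : List Int) (timestamps1_off : List Int) (timestamps2_on : List Int) (timestamps2_off : List Int) : List Int × List Int :=
  -- _check_valid_timestamps raises ValueError on length mismatch: those inputs are excluded by Pre_
  (PySem.List.pyRange 0 (timestamps1_off.length : Int)).foldl (fun acc i =>
    (PySem.List.pyRange 0 (timestamps2_off.length : Int)).foldl (fun acc2 ii =>
      match timestamp_contained_one (PySem.List.pyGetD timestamps1_on i 0) (PySem.List.pyGetD timestamps1_off i 0)
            (PySem.List.pyGetD timestamps2_on ii 0) (PySem.List.pyGetD timestamps2_off ii 0) with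
      | (some x, some y) => (acc2.1 ++ [x], acc2.2 ++ [y])
      | _ => acc2) acc) ([], [])

-- ===== PORT B =====
def timestamps_contained_alt (timestamps1_on : List Int) (timestamps1_off : List Int) (timestamps2_on : List Int) (timestamps2_off : List Int) : List Int × List Int :=
  -- the two length checks raise ValueError on mismatch: excluded by Pre_
  let counts0 : List Int := List.replicate timestamps1_on.length 0
  let counts := (timestamps2_on.zip timestamps2_off).foldl (fun cs p =>
      (cs.zip (timestamps1_on.zip timestamps1_off)).map
        (fun t => if t.2.1 ≥ p.1 ∧ t.2.2 ≤ p.2 then t.1 + 1 else t.1)) counts0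
  ((timestamps1_on.zip timestamps1_off).zip counts).foldl (fun r t =>
      (r.1 ++ List.replicate t.2.toNat t.1.1, r.2 ++ List.replicate t.2.toNat t.1.2)) ([], [])

-- ===== PRECONDITION & SPEC =====
-- Pre_ excludes exactly the inputs on which A's _check_valid_timestamps raises ValueError
-- (mismatched lengths within either on/off pair); A returns normally everywhere else.
def Pre_timestamps_contained (timestamps1_on : List Int) (timestamps1_off : List Int) (timestamps2_on : List Int) (timestamps2_off : List Int) : Prop :=
  timestamps1_on.length = timestamps1_off.length ∧ timestamps2_on.length = timestamps2_off.length
instance (timestamps1_on : List Int) (timestamps1_off : List Int) (timestamps2_on : List Int) (timestamps2_off : List Int) : Decidable (Pre_timestamps_contained timestamps1_on timestamps1_off timestamps2_on timestamps2_off) := by unfold Pre_timestamps_contained; infer_instance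
def pvWitness_timestamps_contained : List Int × List Int × List Int × List Int := ([1, 7], [3, 9], [0, 8], [5, 10])

def Spec_timestamps_contained (timestamps1_on : List Int) (timestamps1_off : List Int) (timestamps2_on : List Int) (timestamps2_off : List Int) (out : List Int × List Int) : Prop := out = timestamps_contained_alt timestamps1_on timestamps1_off timestamps2_on timestamps2_off
instance (timestamps1_on : List Int) (timestamps1_off : List Int) (timestamps2_on : List Int) (timestamps2_off : List Int) (out : List Int × List Int) : Decidable (Spec_timestamps_contained timestamps1_on timestamps1_off timestamps2_on timestamps2_off out) := by unfold Spec_timestamps_contained; infer_instance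

-- ===== CLAIM (what is proved, stated in full; the proofs are below) =====
def Claim_equal_timestamps_contained : Prop := ∀ (timestamps1_on : List Int) (timestamps1_off : List Int) (timestamps2_on : List Int) (timestamps2_off : List Int), Dom_timestamps_contained timestamps1_on timestamps1_off timestamps2_on timestamps2_off → Pre_timestamps_contained timestamps1_on timestamps1_off timestamps2_on timestamps2_off → Spec_timestamps_contained timestamps1_on timestamps1_off timestamps2_on timestamps2_off (timestamps_contained timestamps1_on timestamps1_off timestamps2_on timestamps2_off)

-- ===== LEMMAS AND PROOFS =====

-- number of set-2 intervals containing the query interval ab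
def pvCnt (s : List (Int × Int)) (ab : Int × Int) : Nat :=
  (s.filter (fun (of : Int × Int) => decide (ab.1 ≥ of.1 ∧ ab.2 ≤ of.2))).length

-- the common normal form of both programs' outputs
def pvOut (q s : List (Int × Int)) : List Int × List Int :=
  (q.flatMap (fun ab => List.replicate (pvCnt s ab) ab.1),
   q.flatMap (fun ab => List.replicate (pvCnt s ab) ab.2))

-- an index loop over two equal-length lists is a fold over their zip
theorem pv_idxfold {β : Type} (xs ys : List Int) (h : xs.length = ys.length)
    (F : β → Int → Int → β) (init : β) :
    (PySem.List.pyRange 0 (ys.length : Int)).foldl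
      (fun acc i => F acc (PySem.List.pyGetD xs i 0) (PySem.List.pyGetD ys i 0)) init
    = (xs.zip ys).foldl (fun acc ab => F acc ab.1 ab.2) init := by
  have hlen : ((xs.zip ys).length : Int) = (ys.length : Int) := by simp [h]
  rw [← hlen]
  rw [PySem.List.foldl_congr_mem _ _
      (fun acc i => F acc (PySem.List.pyGetD (xs.zip ys) i (0, 0)).1 (PySem.List.pyGetD (xs.zip ys) i (0, 0)).2) _
      (by
        intro acc i hi
        obtain ⟨h0, h1⟩ := PySem.List.mem_pyRange_one.1 hi
        dsimp only
        rw [PySem.List.pyGetD_eq_getElem (xs.zip ys) (0, 0) h0 h1, List.getElem_zip]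
        have hx : i < (xs.length : Int) := by simpa [h] using h1
        have hy : i < (ys.length : Int) := by simpa [h] using h1
        rw [PySem.List.pyGetD_eq_getElem xs 0 h0 hx, PySem.List.pyGetD_eq_getElem ys 0 h0 hy])]
  exact PySem.List.foldl_pyRange_zero_pyGetD' (xs.zip ys) (0, 0)
    (fun acc ab => F acc ab.1 ab.2) init

-- ---- A = pvOut ----

theorem pv_innerA (s : List (Int × Int)) (a b v : Int) (x : List Int) :
    s.foldl (fun y (of : Int × Int) => if a ≥ of.1 ∧ b ≤ of.2 then y ++ [v] else y) x
    = x ++ List.replicate (pvCnt s (a, b)) v := by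
  rw [PySem.List.foldl_append_ite (fun (of : Int × Int) => a ≥ of.1 ∧ b ≤ of.2) (fun _ => v) s x]
  rw [List.map_const']
  rfl

theorem pv_A_eq (on1 off1 on2 off2 : List Int)
    (h1 : on1.length = off1.length) (h2 : on2.length = off2.length) :
    timestamps_contained on1 off1 on2 off2 = pvOut (on1.zip off1) (on2.zip off2) := by
  unfold timestamps_contained
  rw [PySem.List.foldl_congr_mem _ _
    (fun (acc : List Int × List Int) (i : Int) => (PySem.List.pyRange 0 (off2.length : Int)).foldl
      (fun (acc2 : List Int × List Int) (ii : Int) =>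
        ((if PySem.List.pyGetD on1 i 0 ≥ PySem.List.pyGetD on2 ii 0 ∧
             PySem.List.pyGetD off1 i 0 ≤ PySem.List.pyGetD off2 ii 0
          then acc2.1 ++ [PySem.List.pyGetD on1 i 0] else acc2.1),
         (if PySem.List.pyGetD on1 i 0 ≥ PySem.List.pyGetD on2 ii 0 ∧
             PySem.List.pyGetD off1 i 0 ≤ PySem.List.pyGetD off2 ii 0
          then acc2.2 ++ [PySem.List.pyGetD off1 i 0] else acc2.2))) acc) _
    (by
      intro acc i _
      refine PySem.List.foldl_congr_mem _ _
        (fun (acc2 : List Int × List Int) (ii : Int) =>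
          ((if PySem.List.pyGetD on1 i 0 ≥ PySem.List.pyGetD on2 ii 0 ∧
               PySem.List.pyGetD off1 i 0 ≤ PySem.List.pyGetD off2 ii 0
            then acc2.1 ++ [PySem.List.pyGetD on1 i 0] else acc2.1),
           (if PySem.List.pyGetD on1 i 0 ≥ PySem.List.pyGetD on2 ii 0 ∧
               PySem.List.pyGetD off1 i 0 ≤ PySem.List.pyGetD off2 ii 0
            then acc2.2 ++ [PySem.List.pyGetD off1 i 0] else acc2.2))) _ ?_
      intro acc2 ii _
      unfold timestamp_contained_one
      dsimp only
      split_ifs <;> rfl)]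
  rw [pv_idxfold on1 off1 h1
    (fun (acc : List Int × List Int) (a b : Int) => (PySem.List.pyRange 0 (off2.length : Int)).foldl
      (fun (acc2 : List Int × List Int) (ii : Int) =>
        ((if a ≥ PySem.List.pyGetD on2 ii 0 ∧ b ≤ PySem.List.pyGetD off2 ii 0
          then acc2.1 ++ [a] else acc2.1),
         (if a ≥ PySem.List.pyGetD on2 ii 0 ∧ b ≤ PySem.List.pyGetD off2 ii 0
          then acc2.2 ++ [b] else acc2.2))) acc) ([], [])]
  rw [PySem.List.foldl_congr_mem _ _
    (fun (acc : List Int × List Int) (ab : Int × Int) =>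
      (acc.1 ++ List.replicate (pvCnt (on2.zip off2) ab) ab.1,
       acc.2 ++ List.replicate (pvCnt (on2.zip off2) ab) ab.2)) _
    (by
      intro acc ab _
      dsimp only
      rw [pv_idxfold on2 off2 h2
        (fun (acc2 : List Int × List Int) (o f : Int) =>
          ((if ab.1 ≥ o ∧ ab.2 ≤ f then acc2.1 ++ [ab.1] else acc2.1),
           (if ab.1 ≥ o ∧ ab.2 ≤ f then acc2.2 ++ [ab.2] else acc2.2))) acc]
      rw [PySem.List.foldl_prod_mk
        (f := fun (y : List Int) (of : Int × Int) => if ab.1 ≥ of.1 ∧ ab.2 ≤ of.2 then y ++ [ab.1] else y)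
        (g := fun (y : List Int) (of : Int × Int) => if ab.1 ≥ of.1 ∧ ab.2 ≤ of.2 then y ++ [ab.2] else y)]
      rw [pv_innerA (on2.zip off2) ab.1 ab.2 ab.1 acc.1,
          pv_innerA (on2.zip off2) ab.1 ab.2 ab.2 acc.2])]
  rw [PySem.List.foldl_prod_mk
    (f := fun (x : List Int) (ab : Int × Int) => x ++ List.replicate (pvCnt (on2.zip off2) ab) ab.1)
    (g := fun (x : List Int) (ab : Int × Int) => x ++ List.replicate (pvCnt (on2.zip off2) ab) ab.2)]
  unfold pvOut
  rw [PySem.List.foldl_append_eq_flatMap, PySem.List.foldl_append_eq_flatMap]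
  rfl

-- ---- B = pvOut ----

theorem pv_zip_self_map {α : Type} (q : List α) : q.zip q = q.map (fun ab => (ab, ab)) := by
  induction q with
  | nil => rfl
  | cons a t ih => simpa using ih

theorem pv_zip_map_self {α β : Type} (q : List α) (g : α → β) :
    (q.map g).zip q = q.map (fun ab => (g ab, ab)) := by
  rw [List.zip_map_left, pv_zip_self_map, List.map_map]
  rfl

theorem pv_self_zip_map {α β : Type} (q : List α) (g : α → β) :
    q.zip (q.map g) = q.map (fun ab => (ab, g ab)) := by
  rw [List.zip_map_right, pv_zip_self_map, List.map_map]
  rfl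

theorem pv_counts_eq (q : List (Int × Int)) (s : List (Int × Int)) (g : Int × Int → Int) :
    s.foldl (fun cs p => (cs.zip q).map
        (fun t => if t.2.1 ≥ p.1 ∧ t.2.2 ≤ p.2 then t.1 + 1 else t.1)) (q.map g)
    = q.map (fun ab => g ab + (pvCnt s ab : Int)) := by
  induction s generalizing g with
  | nil => simp [pvCnt]
  | cons p t ih =>
    simp only [List.foldl_cons]
    rw [pv_zip_map_self, List.map_map]
    have hstep : ((fun t => if t.2.1 ≥ p.1 ∧ t.2.2 ≤ p.2 then t.1 + 1 else t.1) ∘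
        (fun ab => (g ab, ab))) = (fun ab : Int × Int => if ab.1 ≥ p.1 ∧ ab.2 ≤ p.2 then g ab + 1 else g ab) := by
      funext ab; by_cases h : ab.1 ≥ p.1 ∧ ab.2 ≤ p.2 <;> simp [h]
    rw [hstep, ih]
    refine List.map_congr_left ?_
    intro ab _
    by_cases h : ab.1 ≥ p.1 ∧ ab.2 ≤ p.2 <;> simp [pvCnt, h]
    ring

theorem pv_B_eq (on1 off1 on2 off2 : List Int)
    (h1 : on1.length = off1.length) :
    timestamps_contained_alt on1 off1 on2 off2 = pvOut (on1.zip off1) (on2.zip off2) := by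
  unfold timestamps_contained_alt
  have hq : (on1.zip off1).length = on1.length := by simp [h1]
  have h0 : List.replicate on1.length (0 : Int) = (on1.zip off1).map (fun _ => 0) := by
    rw [List.map_const', hq]
  simp only [h0, pv_counts_eq]
  have hc : ((on1.zip off1).map (fun ab => (0 : Int) + (pvCnt (on2.zip off2) ab : Int)))
      = (on1.zip off1).map (fun ab => (pvCnt (on2.zip off2) ab : Int)) := by
    simp
  rw [hc, pv_self_zip_map, List.foldl_map]
  rw [PySem.List.foldl_prod_mk
    (f := fun r (ab : Int × Int) => r ++ List.replicate ((pvCnt (on2.zip off2) ab : Int)).toNat ab.1)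
    (g := fun r (ab : Int × Int) => r ++ List.replicate ((pvCnt (on2.zip off2) ab : Int)).toNat ab.2)]
  unfold pvOut
  refine Prod.ext ?_ ?_ <;> simp only <;>
    rw [PySem.List.foldl_append_eq_flatMap] <;> simp

-- ===== VERDICT (by name: the statement is the Claim_ definition above) =====
theorem timestamps_contained_spec : Claim_equal_timestamps_contained := by
  intro on1 off1 on2 off2 _ hpre
  unfold Spec_timestamps_contained
  rw [pv_A_eq on1 off1 on2 off2 hpre.1 hpre.2, pv_B_eq on1 off1 on2 off2 hpre.1]
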